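-- pv_equiv track=rewrite | github.com/Learning-mohameml/Algo | Exercices/leetCode/649_RD/main.py | predictPartVictory
-- ===== SOURCE A (Python) =====
-- from collections import deque
--
-- def predictPartVictory(senate : str) -> str :
--     queue_R = deque()
--     queue_D = deque()
--
--
--     for i , s in enumerate(senate):
--         if s == "R" :
--             queue_R.append(i)
--         else :
--             queue_D.append(i)
--
--     while queue_R and queue_D :
--         r = queue_R.popleft()
--         d = queue_D.popleft()
--
--         if r < d :
--             queue_R.append(r + len(senate))
--         else  :
--             queue_D.append(d + len(senate))
--
--     return "Radiant" if queue_R else "Dire"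
-- ===== SOURCE B (Python) =====
-- from collections import deque
--
--
-- def predictPartVictory(senate: str) -> str:
--     # Single deque of party characters with lazy ban counters and alive counts.
--     dq = deque(senate)
--     ban_r = ban_d = 0
--     alive_r = sum(1 for c in senate if c == 'R')
--     alive_d = len(senate) - alive_r
--     while alive_r > 0 and alive_d > 0:
--         c = dq.popleft()
--         if c == 'R':
--             if ban_r > 0:
--                 ban_r -= 1          # this senator was already banned: eliminated
--             else:
--                 ban_d += 1          # bans the next opposing senator
--                 alive_d -= 1
--                 dq.append(c)
--         else:
--             if ban_d > 0:
--                 ban_d -= 1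
--             else:
--                 ban_r += 1
--                 alive_r -= 1
--                 dq.append(c)
--     return "Radiant" if alive_r > 0 else "Dire"
-- ===== Notes on version B (the rewrite author's own statement) =====
-- stated objective: idiomatic
-- what changed: Replaces the two index queues with comparisons of ever-growing re-numbered indices by a single deque of party characters plus lazy ban counters and alive counts: a popped senator whose party has a pending ban is eliminated, otherwise it bans (counts down) the next opposing senator and re-queues itself.
import Mathlib
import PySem

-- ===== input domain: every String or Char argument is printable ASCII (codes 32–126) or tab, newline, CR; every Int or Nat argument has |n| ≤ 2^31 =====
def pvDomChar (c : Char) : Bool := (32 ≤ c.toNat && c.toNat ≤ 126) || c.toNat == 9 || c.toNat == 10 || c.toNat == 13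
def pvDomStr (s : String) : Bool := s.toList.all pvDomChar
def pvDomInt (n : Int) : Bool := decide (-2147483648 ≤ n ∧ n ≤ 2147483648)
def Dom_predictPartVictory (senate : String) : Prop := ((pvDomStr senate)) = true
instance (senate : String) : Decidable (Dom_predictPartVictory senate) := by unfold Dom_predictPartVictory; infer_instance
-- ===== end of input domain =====

-- B replaces A's two index queues by one deque of party characters with lazy ban
-- counters and alive counts (idiomatic LeetCode-649 solution); return values agree.

-- ===== PORT A =====
-- the while loop of A: pop the front index of each queue, the smaller one survives
-- and is re-queued shifted by len(senate)
-- fuel = total number of queued indices: each round removes exactly one index,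
-- so qR.length + qD.length rounds always suffice (proved in pvLoopA_eager below)
def pvLoopA (n : Int) : Nat → List Int → List Int → List Int × List Int
  | _, [], qD => ([], qD)
  | _, qR, [] => (qR, [])
  | 0, qR, qD => (qR, qD)
  | fuel + 1, r :: tR, d :: tD =>
    if r < d then pvLoopA n fuel (tR ++ [r + n]) tD
    else pvLoopA n fuel tR (tD ++ [d + n])

def predictPartVictory (senate : String) : String :=
  let cs := senate.toList
  let q := (PySem.List.enumerate cs).foldl
      (fun (q : List Int × List Int) p =>
        if p.2 == 'R' then (q.1 ++ [p.1], q.2) else (q.1, q.2 ++ [p.1]))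
      ([], [])
  let f := pvLoopA (cs.length : Int) cs.length q.1 q.2
  if !f.1.isEmpty then "Radiant" else "Dire"

-- ===== PORT B =====
-- the while loop of Source B; fuel = twice the deque length (each round shortens the
-- deque or raises a ban counter, so 2*len rounds always suffice: pvLoopB_eager below)
def pvLoopB : Nat → List Char → Nat → Nat → Nat → Nat → String
  | fuel, dq, bR, bD, aR, aD =>
    if 0 < aR ∧ 0 < aD then
      match fuel, dq with
      | fuel' + 1, c :: t =>
        if c == 'R' then
          if 0 < bR then pvLoopB fuel' t (bR - 1) bD aR aD
          else pvLoopB fuel' (t ++ [c]) bR (bD + 1) aR (aD - 1)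
        else
          if 0 < bD then pvLoopB fuel' t bR (bD - 1) aR aD
          else pvLoopB fuel' (t ++ [c]) (bR + 1) bD (aR - 1) aD
      | _, _ => "Dire"
    else if 0 < aR then "Radiant" else "Dire"

def predictPartVictory_alt (senate : String) : String :=
  let cs := senate.toList
  let aR := cs.countP (· == 'R')
  let aD := cs.length - aR
  pvLoopB (2 * cs.length) cs 0 0 aR aD

-- ===== PRECONDITION & SPEC =====
def Spec_predictPartVictory (senate : String) (out : String) : Prop := out = predictPartVictory_alt senate
instance (senate : String) (out : String) : Decidable (Spec_predictPartVictory senate out) := by unfold Spec_predictPartVictory; infer_instance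

-- ===== CLAIM (what is proved, stated in full; the proofs are below) =====
def Claim_equal_predictPartVictory : Prop := ∀ (senate : String), Dom_predictPartVictory senate → Spec_predictPartVictory senate (predictPartVictory senate)

-- ===== LEMMAS AND PROOFS =====

-- loop invariant of Source B carried for termination: alive count + pending bans of a
-- party = its member count still in the deque
def pvInvB (dq : List Char) (bR bD aR aD : Nat) : Prop :=
  aR + bR = dq.countP (· == 'R') ∧ aD + bD = dq.countP (fun c => !(c == 'R'))

theorem pvCountSum (l : List Char) (p : Char → Bool) :
    l.countP p + l.countP (fun c => !(p c)) = l.length := by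
  induction l with
  | nil => simp
  | cons c t ih => by_cases h : p c <;> simp [List.countP_cons, h] <;> omega

theorem pvInvB_nil_elim (bR bD aR aD : Nat) (h : pvInvB [] bR bD aR aD)
    (hg : 0 < aR ∧ 0 < aD) : False := by
  obtain ⟨h1, _⟩ := h; simp [List.countP_nil] at h1; omega

theorem pvInvB_consR (c : Char) (t : List Char) (bR bD aR aD : Nat)
    (h : pvInvB (c :: t) bR bD aR aD) (hc : (c == 'R') = true) (hb : 0 < bR) :
    pvInvB t (bR - 1) bD aR aD := by
  obtain ⟨h1, h2⟩ := h
  constructor <;> simp [List.countP_cons, hc] at h1 h2 ⊢ <;> omega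

theorem pvInvB_stepR (c : Char) (t : List Char) (bR bD aR aD : Nat)
    (h : pvInvB (c :: t) bR bD aR aD) (hc : (c == 'R') = true) (hg : 0 < aD) :
    pvInvB (t ++ [c]) bR (bD + 1) aR (aD - 1) := by
  obtain ⟨h1, h2⟩ := h
  constructor <;>
    simp [List.countP_cons, List.countP_append, hc] at h1 h2 ⊢ <;> omega

theorem pvInvB_consD (c : Char) (t : List Char) (bR bD aR aD : Nat)
    (h : pvInvB (c :: t) bR bD aR aD) (hc : ¬(c == 'R') = true) (hb : 0 < bD) :
    pvInvB t bR (bD - 1) aR aD := by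
  obtain ⟨h1, h2⟩ := h
  constructor <;> simp [List.countP_cons, hc] at h1 h2 ⊢ <;> omega

theorem pvInvB_stepD (c : Char) (t : List Char) (bR bD aR aD : Nat)
    (h : pvInvB (c :: t) bR bD aR aD) (hc : ¬(c == 'R') = true) (hg : 0 < aR) :
    pvInvB (t ++ [c]) (bR + 1) bD (aR - 1) aD := by
  obtain ⟨h1, h2⟩ := h
  constructor <;>
    simp [List.countP_cons, List.countP_append, hc] at h1 h2 ⊢ <;> omega

theorem pvInvB_bound (dq : List Char) (bR bD aR aD : Nat) (h : pvInvB dq bR bD aR aD) :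
    bR + bD ≤ dq.length := by
  obtain ⟨h1, h2⟩ := h
  have hs := pvCountSum dq (· == 'R')
  omega


-- ghost reference game: one list of party characters; the front senator eliminates
-- the first opposing senator and goes to the back
def pvEager (l : List Char) : String :=
  match l with
  | [] => "Dire"
  | c :: t =>
    if h1 : (c :: t).countP (· == 'R') = 0 then "Dire"
    else if h2 : (c :: t).countP (fun c => !(c == 'R')) = 0 then "Radiant"
    else if hc : c == 'R' then pvEager (t.eraseP (fun x => !(x == 'R')) ++ [c])
    else pvEager (t.eraseP (· == 'R') ++ [c])
termination_by l.length
decreasing_by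
  · have h3 : 0 < t.countP (fun c => !(c == 'R')) := by
      simp [List.countP_cons, hc] at h2 ⊢; omega
    have h4 : t.any (fun x => !(x == 'R')) = true := by
      rw [List.any_eq_true]; exact List.countP_pos_iff.mp h3
    have h5 := List.countP_le_length (p := fun c => !(c == 'R')) (l := t)
    simp [List.length_append, List.length_eraseP, h4]; omega
  · have h3 : 0 < t.countP (· == 'R') := by
      simp [List.countP_cons, hc] at h1 ⊢; omega
    have h4 : t.any (· == 'R') = true := by
      rw [List.any_eq_true]; exact List.countP_pos_iff.mp h3
    have h5 := List.countP_le_length (p := (· == 'R')) (l := t)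
    simp [List.length_append, List.length_eraseP, h4]; omega

-- merge the two index queues back into one char list ordered by index
def pvMerge : List Int → List Int → List Char
  | [], qD => qD.map (fun _ => 'D')
  | qR, [] => qR.map (fun _ => 'R')
  | r :: tR, d :: tD => if r < d then 'R' :: pvMerge tR (d :: tD) else 'D' :: pvMerge (r :: tR) tD
termination_by qR qD => qR.length + qD.length

theorem pvMerge_nil (qR : List Int) : pvMerge qR [] = qR.map (fun _ => 'R') := by
  cases qR <;> simp [pvMerge]

theorem pvMerge_countR (qR qD : List Int) :
    (pvMerge qR qD).countP (· == 'R') = qR.length := by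
  fun_induction pvMerge qR qD with
  | case1 qD => simp [pvMerge, List.countP_replicate]
  | case2 qR h => simp [pvMerge_nil, List.countP_replicate]
  | case3 r tR d tD hlt ih => simp [pvMerge, hlt, List.countP_cons, ih]
  | case4 r tR d tD hlt ih => simp [pvMerge, hlt, List.countP_cons, ih]

theorem pvMerge_countD (qR qD : List Int) :
    (pvMerge qR qD).countP (fun c => !(c == 'R')) = qD.length := by
  fun_induction pvMerge qR qD with
  | case1 qD => simp [pvMerge, List.countP_replicate]
  | case2 qR h => simp [pvMerge_nil, List.countP_replicate]
  | case3 r tR d tD hlt ih => simp [pvMerge, hlt, List.countP_cons, ih]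
  | case4 r tR d tD hlt ih => simp [pvMerge, hlt, List.countP_cons, ih]

-- erasing the first 'D' of the merge drops the head of the D-queue
theorem pvMerge_eraseD (R D' : List Int) (d : Int) (h : ∀ y ∈ D', d < y) :
    (pvMerge R (d :: D')).eraseP (fun x => !(x == 'R')) = pvMerge R D' := by
  induction R with
  | nil => simp [pvMerge, List.eraseP_cons]
  | cons r R' ih =>
    by_cases hrd : r < d
    · rw [show pvMerge (r :: R') (d :: D') = 'R' :: pvMerge R' (d :: D') by
        simp [pvMerge, hrd]]
      rw [List.eraseP_cons]
      simp only [show ((!('R' == 'R')) = false) from rfl]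
      rw [ih]
      cases D' with
      | nil => simp [pvMerge_nil, pvMerge]
      | cons d'' D'' =>
        have : r < d'' := lt_trans hrd (h d'' (by simp))
        simp [pvMerge, this]
    · rw [show pvMerge (r :: R') (d :: D') = 'D' :: pvMerge (r :: R') D' by
        simp [pvMerge, hrd]]
      simp [List.eraseP_cons]

theorem pvMerge_eraseR (R' D : List Int) (r : Int) (h : ∀ x ∈ R', r < x) :
    (pvMerge (r :: R') D).eraseP (· == 'R') = pvMerge R' D := by
  induction D with
  | nil => simp [pvMerge_nil, List.replicate_succ]
  | cons d' D'' ih =>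
    by_cases hrd : r < d'
    · rw [show pvMerge (r :: R') (d' :: D'') = 'R' :: pvMerge R' (d' :: D'') by
        simp [pvMerge, hrd]]
      simp [List.eraseP_cons]
    · rw [show pvMerge (r :: R') (d' :: D'') = 'D' :: pvMerge (r :: R') D'' by
        simp [pvMerge, hrd]]
      rw [List.eraseP_cons]
      simp only [show (('D' == 'R') = false) from rfl, cond_true, cond_false]
      rw [ih]
      cases R' with
      | nil => simp [pvMerge, List.replicate_succ]
      | cons x R'' =>
        have : ¬ x < d' := by have := h x (by simp); omega
        simp [pvMerge, this]

theorem pvMerge_single_R (D : List Int) (m : Int) (hD : ∀ y ∈ D, y < m) :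
    pvMerge [m] D = D.map (fun _ => 'D') ++ ['R'] := by
  induction D with
  | nil => simp [pvMerge]
  | cons d D' ih =>
    have h1 : ¬ m < d := by have := hD d (by simp); omega
    rw [show pvMerge [m] (d :: D') = 'D' :: pvMerge [m] D' by simp [pvMerge, h1]]
    rw [ih (fun y hy => hD y (by simp [hy]))]
    simp

theorem pvMerge_single_D (R : List Int) (m : Int) (hR : ∀ x ∈ R, x < m) :
    pvMerge R [m] = R.map (fun _ => 'R') ++ ['D'] := by
  induction R with
  | nil => simp [pvMerge]
  | cons r R' ih =>
    have h1 : r < m := hR r (by simp)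
    rw [show pvMerge (r :: R') [m] = 'R' :: pvMerge R' [m] by simp [pvMerge, h1]]
    rw [ih (fun x hx => hR x (by simp [hx]))]
    simp

-- appending a maximal index lands at the back of the merge
theorem pvMerge_appendR (R D : List Int) (m : Int)
    (hR : ∀ x ∈ R, x < m) (hD : ∀ y ∈ D, y < m) :
    pvMerge (R ++ [m]) D = pvMerge R D ++ ['R'] := by
  fun_induction pvMerge R D with
  | case1 qD =>
    simp only [List.nil_append]
    rw [pvMerge_single_R qD m hD]
  | case2 qR hne => simp [pvMerge_nil, List.map_append]
  | case3 r tR d tD hlt ih =>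
    have IH := ih (fun x hx => hR x (by simp [hx])) hD
    rw [show (r :: tR) ++ [m] = r :: (tR ++ [m]) from rfl]
    rw [show pvMerge (r :: (tR ++ [m])) (d :: tD) = 'R' :: pvMerge (tR ++ [m]) (d :: tD) by
      simp [pvMerge, hlt]]
    rw [IH]
    simp [pvMerge, hlt]
  | case4 r tR d tD hlt ih =>
    have IH := ih hR (fun y hy => hD y (by simp [hy]))
    rw [show pvMerge ((r :: tR) ++ [m]) (d :: tD) = 'D' :: pvMerge ((r :: tR) ++ [m]) tD by
      simp [pvMerge, hlt]]
    rw [IH]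
    simp [pvMerge, hlt]

theorem pvMerge_appendD (R D : List Int) (m : Int)
    (hR : ∀ x ∈ R, x < m) (hD : ∀ y ∈ D, y < m) :
    pvMerge R (D ++ [m]) = pvMerge R D ++ ['D'] := by
  fun_induction pvMerge R D with
  | case1 qD => simp [pvMerge, List.map_append]
  | case2 qR hne =>
    simp only [List.nil_append]
    simp [pvMerge_single_D qR m hR, pvMerge_nil]
  | case3 r tR d tD hlt ih =>
    have IH := ih (fun x hx => hR x (by simp [hx])) hD
    rw [show (d :: tD) ++ [m] = d :: (tD ++ [m]) from rfl] at IH ⊢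
    rw [show pvMerge (r :: tR) (d :: (tD ++ [m])) = 'R' :: pvMerge tR (d :: (tD ++ [m])) by
      simp [pvMerge, hlt]]
    rw [IH]
    simp [pvMerge, hlt]
  | case4 r tR d tD hlt ih =>
    have IH := ih hR (fun y hy => hD y (by simp [hy]))
    rw [show (d :: tD) ++ [m] = d :: (tD ++ [m]) from rfl]
    rw [show pvMerge (r :: tR) (d :: (tD ++ [m])) = 'D' :: pvMerge (r :: tR) (tD ++ [m]) by
      simp [pvMerge, hlt]]
    rw [IH]
    simp [pvMerge, hlt]

-- A's loop plays the eager game on the merged list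
theorem pvLoopA_eager (n : Int) (fuel : Nat) (qR qD : List Int)
    (hF : qR.length + qD.length ≤ fuel)
    (hR : qR.Pairwise (· < ·)) (hD : qD.Pairwise (· < ·))
    (hW : ∀ x ∈ qR ++ qD, ∀ y ∈ qR ++ qD, y < x + n) :
    (if !(pvLoopA n fuel qR qD).1.isEmpty then "Radiant" else "Dire") = pvEager (pvMerge qR qD) := by
  induction fuel generalizing qR qD with
  | zero =>
    rcases qR with _ | ⟨r, tR⟩
    · rw [show pvLoopA n 0 [] qD = ([], qD) by simp [pvLoopA]]
      rcases qD with _ | ⟨d, tD⟩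
      · simp [pvMerge, pvEager]
      · rw [show pvMerge [] (d :: tD) = 'D' :: List.map (fun _ => 'D') tD by simp [pvMerge]]
        rw [pvEager, dif_pos (by simp [List.countP_cons, List.countP_map])]
        simp
    · rcases qD with _ | ⟨d, tD⟩
      · rw [show pvLoopA n 0 (r :: tR) [] = (r :: tR, []) by simp [pvLoopA]]
        rw [pvMerge_nil]
        rw [show List.map (fun _ => 'R') (r :: tR) = 'R' :: List.map (fun _ => 'R') tR by simp]
        rw [pvEager, dif_neg (by simp), dif_pos (by simp [List.countP_cons, List.countP_map])]
        simp
      · exfalso; simp at hF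
  | succ fuel IH =>
    rcases qR with _ | ⟨r, tR⟩
    · rw [show pvLoopA n (fuel + 1) [] qD = ([], qD) by simp [pvLoopA]]
      rcases qD with _ | ⟨d, tD⟩
      · simp [pvMerge, pvEager]
      · rw [show pvMerge [] (d :: tD) = 'D' :: List.map (fun _ => 'D') tD by simp [pvMerge]]
        rw [pvEager, dif_pos (by simp [List.countP_cons, List.countP_map])]
        simp
    rcases qD with _ | ⟨d, tD⟩
    · rw [show pvLoopA n (fuel + 1) (r :: tR) [] = (r :: tR, []) by simp [pvLoopA]]
      rw [pvMerge_nil]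
      rw [show List.map (fun _ => 'R') (r :: tR) = 'R' :: List.map (fun _ => 'R') tR by simp]
      rw [pvEager, dif_neg (by simp), dif_pos (by simp [List.countP_cons, List.countP_map])]
      simp
    have hn : (0:Int) < n := by have := hW r (by simp) r (by simp); omega
    have hrx : ∀ x ∈ tR, r < x := fun x hx => (List.pairwise_cons.mp hR).1 x hx
    have hdx : ∀ y ∈ tD, d < y := fun y hy => (List.pairwise_cons.mp hD).1 y hy
    by_cases hrd : r < d
    · have hbR : ∀ x ∈ tR, x < r + n := fun x hx => hW r (by simp) x (by simp [hx])
      have hbD : ∀ y ∈ tD, y < r + n := fun y hy => hW r (by simp) y (by simp [hy])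
      have hR' : (tR ++ [r + n]).Pairwise (· < ·) :=
        List.pairwise_append.mpr ⟨(List.pairwise_cons.mp hR).2, List.pairwise_singleton _ _,
          fun x hx y hy => by simp at hy; subst hy; exact hbR x hx⟩
      have hD' : tD.Pairwise (· < ·) := (List.pairwise_cons.mp hD).2
      have hW' : ∀ x ∈ (tR ++ [r + n]) ++ tD, ∀ y ∈ (tR ++ [r + n]) ++ tD, y < x + n := by
        intro x hx y hy
        simp only [List.mem_append, List.mem_singleton] at hx hy
        rcases hx with (hx | rfl) | hx <;> rcases hy with (hy | rfl) | hy
        · exact hW x (by simp [hx]) y (by simp [hy])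
        · have := hrx x hx; omega
        · exact hW x (by simp [hx]) y (by simp [hy])
        · have := hbR y hy; omega
        · omega
        · have := hbD y hy; omega
        · exact hW x (by simp [hx]) y (by simp [hy])
        · have := hdx x hx; have := hrd; omega
        · exact hW x (by simp [hx]) y (by simp [hy])
      rw [show pvLoopA n (fuel + 1) (r :: tR) (d :: tD) = pvLoopA n fuel (tR ++ [r + n]) tD by
        conv_lhs => rw [pvLoopA]
        simp [hrd]]
      rw [IH (tR ++ [r + n]) tD (by simp [List.length_append] at hF ⊢; omega) hR' hD' hW']
      rw [show pvMerge (r :: tR) (d :: tD) = 'R' :: pvMerge tR (d :: tD) by simp [pvMerge, hrd]]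
      have e1 : ¬ ('R' :: pvMerge tR (d :: tD)).countP (· == 'R') = 0 := by
        simp [List.countP_cons]
      have e2 : ¬ ('R' :: pvMerge tR (d :: tD)).countP (fun c => !(c == 'R')) = 0 := by
        rw [List.countP_cons, pvMerge_countD]; simp
      rw [pvEager, dif_neg e1, dif_neg e2, dif_pos (show ('R' == 'R') = true from rfl)]
      rw [pvMerge_eraseD tR tD d hdx]
      rw [pvMerge_appendR tR tD (r + n) hbR hbD]
    · have hbR : ∀ x ∈ tR, x < d + n := fun x hx => hW d (by simp) x (by simp [hx])
      have hbD : ∀ y ∈ tD, y < d + n := fun y hy => hW d (by simp) y (by simp [hy])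
      have hR' : tR.Pairwise (· < ·) := (List.pairwise_cons.mp hR).2
      have hD' : (tD ++ [d + n]).Pairwise (· < ·) :=
        List.pairwise_append.mpr ⟨(List.pairwise_cons.mp hD).2, List.pairwise_singleton _ _,
          fun y hy x hx => by simp at hx; subst hx; exact hbD y hy⟩
      have hW' : ∀ x ∈ tR ++ (tD ++ [d + n]), ∀ y ∈ tR ++ (tD ++ [d + n]), y < x + n := by
        intro x hx y hy
        simp only [List.mem_append, List.mem_singleton] at hx hy
        rcases hx with hx | (hx | rfl) <;> rcases hy with hy | (hy | rfl)
        · exact hW x (by simp [hx]) y (by simp [hy])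
        · exact hW x (by simp [hx]) y (by simp [hy])
        · have := hrx x hx; omega
        · exact hW x (by simp [hx]) y (by simp [hy])
        · exact hW x (by simp [hx]) y (by simp [hy])
        · have := hdx x hx; omega
        · have := hbR y hy; omega
        · have := hbD y hy; omega
        · omega
      rw [show pvLoopA n (fuel + 1) (r :: tR) (d :: tD) = pvLoopA n fuel tR (tD ++ [d + n]) by
        conv_lhs => rw [pvLoopA]
        simp [hrd]]
      rw [IH tR (tD ++ [d + n]) (by simp [List.length_append] at hF ⊢; omega) hR' hD' hW']
      rw [show pvMerge (r :: tR) (d :: tD) = 'D' :: pvMerge (r :: tR) tD by simp [pvMerge, hrd]]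
      have e1 : ¬ ('D' :: pvMerge (r :: tR) tD).countP (· == 'R') = 0 := by
        rw [List.countP_cons, pvMerge_countR]; simp
      have e2 : ¬ ('D' :: pvMerge (r :: tR) tD).countP (fun c => !(c == 'R')) = 0 := by
        simp [List.countP_cons]
      rw [pvEager, dif_neg e1, dif_neg e2, dif_neg (by simp)]
      rw [pvMerge_eraseR tR tD r hrx]
      rw [pvMerge_appendD tR tD (d + n) hbR hbD]

-- lazy-deletion view of B's deque: the first bR 'R's and first bD non-'R's are dead
def pvDrop : List Char → Nat → Nat → List Char
  | [], _, _ => []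
  | c :: t, bR, bD =>
    if c == 'R' then
      if 0 < bR then pvDrop t (bR - 1) bD else c :: pvDrop t bR bD
    else
      if 0 < bD then pvDrop t bR (bD - 1) else c :: pvDrop t bR bD

theorem pvDrop_countR (t : List Char) (bR bD : Nat) :
    (pvDrop t bR bD).countP (· == 'R') = t.countP (· == 'R') - bR := by
  induction t generalizing bR bD with
  | nil => simp [pvDrop]
  | cons c t ih =>
    by_cases hc : c == 'R'
    · by_cases hb : 0 < bR
      · simp [pvDrop, hc, hb, List.countP_cons, ih]; omega
      · simp [pvDrop, hc, hb, List.countP_cons, ih]; omega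
    · by_cases hb : 0 < bD <;> simp [pvDrop, hc, hb, List.countP_cons, ih]

theorem pvDrop_countD (t : List Char) (bR bD : Nat) :
    (pvDrop t bR bD).countP (fun c => !(c == 'R')) = t.countP (fun c => !(c == 'R')) - bD := by
  induction t generalizing bR bD with
  | nil => simp [pvDrop]
  | cons c t ih =>
    by_cases hc : c == 'R'
    · by_cases hb : 0 < bR <;> simp [pvDrop, hc, hb, List.countP_cons, ih]
    · by_cases hb : 0 < bD
      · simp [pvDrop, hc, hb, List.countP_cons, ih]; omega
      · simp [pvDrop, hc, hb, List.countP_cons, ih]; omega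

theorem pvDrop_appendR (t : List Char) (bR bD : Nat) (h : bR ≤ t.countP (· == 'R')) :
    pvDrop (t ++ ['R']) bR bD = pvDrop t bR bD ++ ['R'] := by
  induction t generalizing bR bD with
  | nil =>
    simp [List.countP_nil] at h
    simp [pvDrop, h]
  | cons c t ih =>
    by_cases hc : c == 'R'
    · by_cases hb : 0 < bR
      · have : bR - 1 ≤ t.countP (· == 'R') := by
          simp [List.countP_cons, hc] at h; omega
        simp [pvDrop, hc, hb, ih _ _ this]
      · have : bR ≤ t.countP (· == 'R') := by
          simp [List.countP_cons, hc] at h; omega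
        simp [pvDrop, hc, hb, ih _ _ this]
    · have h' : bR ≤ t.countP (· == 'R') := by
        simp [List.countP_cons, hc] at h; omega
      by_cases hb : 0 < bD <;> simp [pvDrop, hc, hb, ih _ _ h']

theorem pvDrop_appendD (t : List Char) (c : Char) (bR bD : Nat) (hc : ¬(c == 'R'))
    (h : bD ≤ t.countP (fun x => !(x == 'R'))) :
    pvDrop (t ++ [c]) bR bD = pvDrop t bR bD ++ [c] := by
  induction t generalizing bR bD with
  | nil =>
    simp [List.countP_nil] at h
    simp [pvDrop, h, hc]
  | cons c' t ih =>
    by_cases hc' : c' == 'R'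
    · by_cases hb : 0 < bR <;>
        · have h' : bD ≤ t.countP (fun x => !(x == 'R')) := by
            simp [List.countP_cons, hc'] at h; omega
          simp [pvDrop, hc', hb, ih _ _ h']
    · by_cases hb : 0 < bD
      · have h' : bD - 1 ≤ t.countP (fun x => !(x == 'R')) := by
          simp [List.countP_cons, hc'] at h; omega
        simp [pvDrop, hc', hb, ih _ _ h']
      · have h' : bD ≤ t.countP (fun x => !(x == 'R')) := by
          simp [List.countP_cons, hc'] at h; omega
        simp [pvDrop, hc', hb, ih _ _ h']

theorem pvDrop_succD (t : List Char) (bR bD : Nat) (h : bD < t.countP (fun c => !(c == 'R'))) :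
    pvDrop t bR (bD + 1) = (pvDrop t bR bD).eraseP (fun x => !(x == 'R')) := by
  induction t generalizing bR bD with
  | nil => simp [List.countP_nil] at h
  | cons c t ih =>
    by_cases hc : c == 'R'
    · have h' : bD < t.countP (fun x => !(x == 'R')) := by
        simp [List.countP_cons, hc] at h; omega
      have hcR : c = 'R' := by simpa using hc
      by_cases hb : 0 < bR
      · simp [pvDrop, hc, hb, ih _ _ h']
      · simp [pvDrop, hc, hb, ih _ _ h', List.eraseP_cons, hcR]
    · by_cases hb : 0 < bD
      · have h' : bD - 1 < t.countP (fun x => !(x == 'R')) := by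
          simp [List.countP_cons, hc] at h; omega
        have e : bD - 1 + 1 = bD := by omega
        rw [show pvDrop (c :: t) bR (bD + 1) = pvDrop t bR bD by simp [pvDrop, hc, hb]]
        rw [show pvDrop (c :: t) bR bD = pvDrop t bR (bD - 1) by simp [pvDrop, hc, hb]]
        rw [← ih _ _ h', e]
      · have hb0 : bD = 0 := by omega
        subst hb0
        rw [show pvDrop (c :: t) bR (0 + 1) = pvDrop t bR 0 by simp [pvDrop, hc]]
        rw [show pvDrop (c :: t) bR 0 = c :: pvDrop t bR 0 by simp [pvDrop, hc]]
        simp [List.eraseP_cons, hc]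

theorem pvDrop_succR (t : List Char) (bR bD : Nat) (h : bR < t.countP (· == 'R')) :
    pvDrop t (bR + 1) bD = (pvDrop t bR bD).eraseP (· == 'R') := by
  induction t generalizing bR bD with
  | nil => simp [List.countP_nil] at h
  | cons c t ih =>
    by_cases hc : c == 'R'
    · by_cases hb : 0 < bR
      · have h' : bR - 1 < t.countP (· == 'R') := by
          simp [List.countP_cons, hc] at h; omega
        have e : bR - 1 + 1 = bR := by omega
        rw [show pvDrop (c :: t) (bR + 1) bD = pvDrop t bR bD by simp [pvDrop, hc, hb]]
        rw [show pvDrop (c :: t) bR bD = pvDrop t (bR - 1) bD by simp [pvDrop, hc, hb]]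
        rw [← ih _ _ h', e]
      · have hb0 : bR = 0 := by omega
        subst hb0
        rw [show pvDrop (c :: t) (0 + 1) bD = pvDrop t 0 bD by simp [pvDrop, hc]]
        rw [show pvDrop (c :: t) 0 bD = c :: pvDrop t 0 bD by simp [pvDrop, hc]]
        simp [List.eraseP_cons, hc]
    · have h' : bR < t.countP (· == 'R') := by
        simp [List.countP_cons, hc] at h; omega
      by_cases hb : 0 < bD
      · simp [pvDrop, hc, hb, ih _ _ h']
      · simp [pvDrop, hc, hb, ih _ _ h', List.eraseP_cons]

theorem pvLoopB_exit (fuel : Nat) (dq : List Char) (bR bD aR aD : Nat)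
    (hg : ¬(0 < aR ∧ 0 < aD)) :
    pvLoopB fuel dq bR bD aR aD = if 0 < aR then "Radiant" else "Dire" := by
  cases fuel <;> cases dq <;> simp [pvLoopB, hg]

-- B's loop plays the eager game on the alive part of its deque
theorem pvLoopB_eager (fuel : Nat) (dq : List Char) (bR bD aR aD : Nat)
    (h : pvInvB dq bR bD aR aD) (hF : 2 * dq.length - (bR + bD) ≤ fuel) :
    pvLoopB fuel dq bR bD aR aD = pvEager (pvDrop dq bR bD) := by
  induction fuel generalizing dq bR bD aR aD with
  | zero =>
    by_cases hg : 0 < aR ∧ 0 < aD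
    · exfalso
      rcases dq with _ | ⟨c, t⟩
      · exact pvInvB_nil_elim bR bD aR aD h hg
      · have := pvInvB_bound _ _ _ _ _ h
        simp at this hF
        omega
    · obtain ⟨h1, h2⟩ := h
      have e1 : (pvDrop dq bR bD).countP (· == 'R') = aR := by rw [pvDrop_countR]; omega
      have e2 : (pvDrop dq bR bD).countP (fun c => !(c == 'R')) = aD := by
        rw [pvDrop_countD]; omega
      rw [pvLoopB_exit 0 dq bR bD aR aD hg]
      by_cases ha : 0 < aR
      · have haD : aD = 0 := by omega
        cases hL : pvDrop dq bR bD with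
        | nil => rw [hL] at e1; simp at e1; omega
        | cons x L' =>
          rw [hL] at e1 e2
          rw [if_pos ha, pvEager, dif_neg (by omega), dif_pos (by omega)]
      · cases hL : pvDrop dq bR bD with
        | nil => simp [ha, pvEager]
        | cons x L' =>
          rw [hL] at e1
          rw [if_neg ha, pvEager, dif_pos (by omega)]
  | succ fuel ih =>
    by_cases hg : 0 < aR ∧ 0 < aD
    · rcases dq with _ | ⟨c, t⟩
      · exact absurd (pvInvB_nil_elim bR bD aR aD h hg) (by simp)
      have hbound := pvInvB_bound _ _ _ _ _ h
      by_cases hc : c == 'R'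
      · by_cases hb : 0 < bR
        · rw [show pvLoopB (fuel + 1) (c :: t) bR bD aR aD = pvLoopB fuel t (bR - 1) bD aR aD by
            rw [pvLoopB]; simp [hg, hc, hb]]
          rw [ih t (bR - 1) bD aR aD (pvInvB_consR c t bR bD aR aD h hc hb)
            (by simp at hF ⊢; omega)]
          congr 1
          simp [pvDrop, hc, hb]
        · obtain ⟨h1, h2⟩ := h
          have hcR : c = 'R' := by simpa using hc
          subst hcR
          have hb0 : bR = 0 := by omega
          subst hb0
          rw [show pvLoopB (fuel + 1) ('R' :: t) 0 bD aR aD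
                = pvLoopB fuel (t ++ ['R']) 0 (bD + 1) aR (aD - 1) by
            rw [pvLoopB]; simp [hg, hb]]
          rw [ih (t ++ ['R']) 0 (bD + 1) aR (aD - 1)
            (pvInvB_stepR 'R' t 0 bD aR aD ⟨h1, h2⟩ rfl hg.2)
            (by simp [List.length_append] at hF ⊢; omega)]
          simp only [List.countP_cons] at h1 h2
          simp at h1 h2
          have hcnt : bD < t.countP (fun c => !(c == 'R')) := by omega
          rw [pvDrop_appendR t 0 (bD + 1) (by omega)]
          rw [pvDrop_succD t 0 bD hcnt]
          rw [show pvDrop ('R' :: t) 0 bD = 'R' :: pvDrop t 0 bD by simp [pvDrop]]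
          have e1 : ¬ ('R' :: pvDrop t 0 bD).countP (· == 'R') = 0 := by
            simp [List.countP_cons]
          have e2 : ¬ ('R' :: pvDrop t 0 bD).countP (fun c => !(c == 'R')) = 0 := by
            rw [List.countP_cons]
            rw [pvDrop_countD t 0 bD]
            simp; omega
          rw [pvEager, dif_neg e1, dif_neg e2, dif_pos (show ('R' == 'R') = true from rfl)]
      · by_cases hb : 0 < bD
        · rw [show pvLoopB (fuel + 1) (c :: t) bR bD aR aD = pvLoopB fuel t bR (bD - 1) aR aD by
            rw [pvLoopB]; simp [hg, hc, hb]]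
          rw [ih t bR (bD - 1) aR aD (pvInvB_consD c t bR bD aR aD h hc hb)
            (by simp at hF ⊢; omega)]
          congr 1
          simp [pvDrop, hc, hb]
        · obtain ⟨h1, h2⟩ := h
          have hb0 : bD = 0 := by omega
          subst hb0
          rw [show pvLoopB (fuel + 1) (c :: t) bR 0 aR aD
                = pvLoopB fuel (t ++ [c]) (bR + 1) 0 (aR - 1) aD by
            rw [pvLoopB]; simp [hg, hc, hb]]
          rw [ih (t ++ [c]) (bR + 1) 0 (aR - 1) aD
            (pvInvB_stepD c t bR 0 aR aD ⟨h1, h2⟩ hc hg.1)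
            (by simp [List.length_append] at hF ⊢; omega)]
          simp only [List.countP_cons] at h1 h2
          simp [hc] at h1 h2
          have hcnt : bR < t.countP (· == 'R') := by omega
          rw [pvDrop_appendD t c (bR + 1) 0 hc (by omega)]
          rw [pvDrop_succR t bR 0 hcnt]
          rw [show pvDrop (c :: t) bR 0 = c :: pvDrop t bR 0 by simp [pvDrop, hc]]
          have e1 : ¬ (c :: pvDrop t bR 0).countP (· == 'R') = 0 := by
            rw [List.countP_cons]
            rw [pvDrop_countR t bR 0]
            omega
          have e2 : ¬ (c :: pvDrop t bR 0).countP (fun c => !(c == 'R')) = 0 := by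
            rw [List.countP_cons]
            simp [hc]
          rw [pvEager, dif_neg e1, dif_neg e2, dif_neg hc]
    · obtain ⟨h1, h2⟩ := h
      have e1 : (pvDrop dq bR bD).countP (· == 'R') = aR := by rw [pvDrop_countR]; omega
      have e2 : (pvDrop dq bR bD).countP (fun c => !(c == 'R')) = aD := by
        rw [pvDrop_countD]; omega
      rw [pvLoopB_exit (fuel + 1) dq bR bD aR aD hg]
      by_cases ha : 0 < aR
      · cases hL : pvDrop dq bR bD with
        | nil => rw [hL] at e1; simp at e1; omega
        | cons x L' =>
          rw [hL] at e1 e2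
          rw [if_pos ha, pvEager, dif_neg (by omega), dif_pos (by omega)]
      · cases hL : pvDrop dq bR bD with
        | nil => simp [ha, pvEager]
        | cons x L' =>
          rw [hL] at e1
          rw [if_neg ha, pvEager, dif_pos (by omega)]

-- indices at which p holds, counting from k (what A's building loop collects)
def pvIdxP (p : Char → Bool) : List Char → Int → List Int
  | [], _ => []
  | c :: t, k => if p c then k :: pvIdxP p t (k + 1) else pvIdxP p t (k + 1)

theorem pvIdxP_mem (p : Char → Bool) (cs : List Char) (k : Int) (x : Int)
    (hx : x ∈ pvIdxP p cs k) : k ≤ x ∧ x < k + cs.length := by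
  induction cs generalizing k with
  | nil => simp [pvIdxP] at hx
  | cons c t ih =>
    by_cases hc : p c
    · simp [pvIdxP, hc] at hx
      rcases hx with rfl | hx
      · simp only [List.length_cons]; constructor <;> omega
      · have := ih (k + 1) hx; simp at this ⊢; omega
    · simp [pvIdxP, hc] at hx
      have := ih (k + 1) hx; simp at this ⊢; omega

theorem pvIdxP_pairwise (p : Char → Bool) (cs : List Char) (k : Int) :
    (pvIdxP p cs k).Pairwise (· < ·) := by
  induction cs generalizing k with
  | nil => simp [pvIdxP]
  | cons c t ih =>
    by_cases hc : p c
    · simp only [pvIdxP, hc, if_pos]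
      refine List.pairwise_cons.mpr ⟨fun x hx => ?_, ih (k + 1)⟩
      have := pvIdxP_mem p t (k + 1) x hx
      omega
    · rw [show pvIdxP p (c :: t) k = pvIdxP p t (k + 1) by simp [pvIdxP, hc]]
      exact ih (k + 1)

theorem pvIdxP_length (p : Char → Bool) (cs : List Char) (k : Int) :
    (pvIdxP p cs k).length = cs.countP p := by
  induction cs generalizing k with
  | nil => simp [pvIdxP]
  | cons c t ih =>
    by_cases hc : p c <;> simp [pvIdxP, hc, List.countP_cons, ih]

theorem pvBuild_eq (cs : List Char) (k : Int) (accR accD : List Int) :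
    (PySem.List.enumerate cs k).foldl
      (fun (q : List Int × List Int) p =>
        if p.2 == 'R' then (q.1 ++ [p.1], q.2) else (q.1, q.2 ++ [p.1]))
      (accR, accD)
    = (accR ++ pvIdxP (· == 'R') cs k, accD ++ pvIdxP (fun c => !(c == 'R')) cs k) := by
  induction cs generalizing k accR accD with
  | nil => simp [PySem.List.enumerate_nil, pvIdxP]
  | cons c t ih =>
    rw [PySem.List.enumerate_cons]
    by_cases hc : c == 'R'
    · simp only [List.foldl_cons, hc, if_pos, ih]
      simp [pvIdxP, hc]
    · simp only [List.foldl_cons, ih]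
      simp [pvIdxP, hc]

-- non-'R' characters all play as 'D'
def pvNorm (c : Char) : Char := if c == 'R' then 'R' else 'D'

theorem pvMerge_idx (cs : List Char) (k : Int) :
    pvMerge (pvIdxP (· == 'R') cs k) (pvIdxP (fun c => !(c == 'R')) cs k) = cs.map pvNorm := by
  induction cs generalizing k with
  | nil => simp [pvIdxP, pvMerge]
  | cons c t ih =>
    by_cases hc : c == 'R'
    · have hnc : pvNorm c = 'R' := by simp [pvNorm, hc]
      rw [show pvIdxP (· == 'R') (c :: t) k = k :: pvIdxP (· == 'R') t (k + 1) by
        simp [pvIdxP, hc]]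
      rw [show pvIdxP (fun c => !(c == 'R')) (c :: t) k = pvIdxP (fun c => !(c == 'R')) t (k + 1) by
        simp [pvIdxP, hc]]
      cases hD : pvIdxP (fun c => !(c == 'R')) t (k + 1) with
      | nil =>
        have ht := ih (k + 1)
        rw [hD, pvMerge_nil] at ht
        simp [pvMerge_nil, hnc, ht]
      | cons d D' =>
        have hkd : k < d := by
          have := pvIdxP_mem (fun c => !(c == 'R')) t (k + 1) d (by rw [hD]; simp)
          omega
        rw [show pvMerge (k :: pvIdxP (· == 'R') t (k + 1)) (d :: D')
              = 'R' :: pvMerge (pvIdxP (· == 'R') t (k + 1)) (d :: D') by simp [pvMerge, hkd]]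
        rw [← hD, ih (k + 1)]
        simp [hnc]
    · have hnc : pvNorm c = 'D' := by simp [pvNorm, hc]
      rw [show pvIdxP (· == 'R') (c :: t) k = pvIdxP (· == 'R') t (k + 1) by
        simp [pvIdxP, hc]]
      rw [show pvIdxP (fun c => !(c == 'R')) (c :: t) k
            = k :: pvIdxP (fun c => !(c == 'R')) t (k + 1) by simp [pvIdxP, hc]]
      cases hR : pvIdxP (· == 'R') t (k + 1) with
      | nil =>
        have ht := ih (k + 1)
        rw [hR] at ht
        rw [show pvMerge [] (k :: pvIdxP (fun c => !(c == 'R')) t (k + 1))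
              = 'D' :: pvMerge [] (pvIdxP (fun c => !(c == 'R')) t (k + 1)) by simp [pvMerge]]
        simp [pvMerge] at ht
        simp [pvMerge, hnc, ht]
      | cons r R' =>
        have hkr : ¬ r < k := by
          have := pvIdxP_mem (· == 'R') t (k + 1) r (by rw [hR]; simp)
          omega
        rw [show pvMerge (r :: R') (k :: pvIdxP (fun c => !(c == 'R')) t (k + 1))
              = 'D' :: pvMerge (r :: R') (pvIdxP (fun c => !(c == 'R')) t (k + 1)) by
            simp [pvMerge, hkr]]
        rw [← hR, ih (k + 1)]
        simp [hnc]

theorem pvNormPredR : ((· == 'R') ∘ pvNorm) = (· == 'R') :=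
  funext fun c => by by_cases h : c == 'R' <;> simp [pvNorm, h]

theorem pvNormPredD : ((fun c => !(c == 'R')) ∘ pvNorm) = (fun c => !(c == 'R')) :=
  funext fun c => by by_cases h : c == 'R' <;> simp [pvNorm, h]

-- the eager game only looks at characters through (· == 'R'), so normalizing is invisible
theorem pvEager_map_norm (l : List Char) : pvEager (l.map pvNorm) = pvEager l := by
  fun_induction pvEager l with
  | case1 => simp [pvEager]
  | case2 c t h1 =>
    have e1 : (pvNorm c :: List.map pvNorm t).countP (· == 'R') = 0 := by
      rw [← List.map_cons, List.countP_map, pvNormPredR]; exact h1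
    rw [List.map_cons, pvEager, dif_pos e1]
  | case3 c t h1 h2 =>
    have e1 : ¬ (pvNorm c :: List.map pvNorm t).countP (· == 'R') = 0 := by
      rw [← List.map_cons, List.countP_map, pvNormPredR]; exact h1
    have e2 : (pvNorm c :: List.map pvNorm t).countP (fun c => !(c == 'R')) = 0 := by
      rw [← List.map_cons, List.countP_map, pvNormPredD]; exact h2
    rw [List.map_cons, pvEager, dif_neg e1, dif_pos e2]
  | case4 c t h1 h2 hc ih =>
    have hcR : c = 'R' := by simpa using hc
    have e1 : ¬ (pvNorm c :: List.map pvNorm t).countP (· == 'R') = 0 := by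
      rw [← List.map_cons, List.countP_map, pvNormPredR]; exact h1
    have e2 : ¬ (pvNorm c :: List.map pvNorm t).countP (fun c => !(c == 'R')) = 0 := by
      rw [← List.map_cons, List.countP_map, pvNormPredD]; exact h2
    have hnc : pvNorm c = 'R' := by simp [pvNorm, hc]
    rw [List.map_cons, pvEager, dif_neg e1, dif_neg e2, dif_pos (by rw [hnc]; rfl)]
    rw [List.eraseP_map, pvNormPredD]
    rw [show List.map pvNorm (List.eraseP (fun x => !(x == 'R')) t) ++ [pvNorm c]
          = List.map pvNorm (List.eraseP (fun x => !(x == 'R')) t ++ [c]) by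
        simp]
    exact ih
  | case5 c t h1 h2 hc ih =>
    have e1 : ¬ (pvNorm c :: List.map pvNorm t).countP (· == 'R') = 0 := by
      rw [← List.map_cons, List.countP_map, pvNormPredR]; exact h1
    have e2 : ¬ (pvNorm c :: List.map pvNorm t).countP (fun c => !(c == 'R')) = 0 := by
      rw [← List.map_cons, List.countP_map, pvNormPredD]; exact h2
    have hnc : pvNorm c = 'D' := by simp [pvNorm, hc]
    rw [List.map_cons, pvEager, dif_neg e1, dif_neg e2, dif_neg (by rw [hnc]; simp)]
    rw [List.eraseP_map, pvNormPredR]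
    rw [show List.map pvNorm (List.eraseP (· == 'R') t) ++ [pvNorm c]
          = List.map pvNorm (List.eraseP (· == 'R') t ++ [c]) by
        simp]
    exact ih

theorem pvDrop_zero (l : List Char) : pvDrop l 0 0 = l := by
  induction l with
  | nil => rfl
  | cons c t ih => by_cases hc : c == 'R' <;> simp [pvDrop, hc, ih]

-- ===== VERDICT (by name: the statement is the Claim_ definition above) =====
theorem predictPartVictory_spec : Claim_equal_predictPartVictory := by
  unfold Claim_equal_predictPartVictory
  intro senate _
  unfold Spec_predictPartVictory
  show predictPartVictory senate = predictPartVictory_alt senate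
  have hA : predictPartVictory senate = pvEager senate.toList := by
    unfold predictPartVictory
    simp only [pvBuild_eq, List.nil_append]
    rw [pvLoopA_eager (senate.toList.length : Int) senate.toList.length
      (pvIdxP (· == 'R') senate.toList 0) (pvIdxP (fun c => !(c == 'R')) senate.toList 0)
      ?_ (pvIdxP_pairwise _ _ _) (pvIdxP_pairwise _ _ _) ?_]
    · rw [pvMerge_idx senate.toList 0, pvEager_map_norm]
    · rw [pvIdxP_length, pvIdxP_length]
      have := pvCountSum senate.toList (· == 'R')
      omega
    · intro x hx y hy
      rcases List.mem_append.mp hx with hx' | hx' <;>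
        rcases List.mem_append.mp hy with hy' | hy' <;>
        · have h1 := pvIdxP_mem _ _ _ _ hx'
          have h2 := pvIdxP_mem _ _ _ _ hy'
          omega
  have hB : predictPartVictory_alt senate = pvEager senate.toList := by
    unfold predictPartVictory_alt
    rw [pvLoopB_eager (2 * senate.toList.length) senate.toList 0 0 _ _
      ⟨by simp, by have := pvCountSum senate.toList (· == 'R'); simp at this ⊢; omega⟩ (by omega)]
    rw [pvDrop_zero]
  rw [hA, hB]
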